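-- pv_equiv track=rewrite | github.com/venkateshnayak9490/Textonic | HYBRID_IMPLEMENTATION/src/hybrid/pipeline.py | _ensure_source_diversity
-- ===== SOURCE A (Python) =====
-- from typing import Dict, List, Tuple, Optional
--
-- def _ensure_source_diversity(candidates: List[Dict], top_k: int) -> List[Dict]:
--     """Prefer at least one KG and one text evidence item in final fused selection when available."""
--     if not candidates:
--         return []
--
--     selected = candidates[:top_k]
--     has_kg = any(c.get('source') == 'kg' for c in selected)
--     has_text = any(c.get('source') == 'text' for c in selected)
--
--     if has_kg and has_text:
--         return selected
--
--     # Add missing source types without overwriting existing candidates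
--     if not has_kg and len(selected) < top_k:
--         kg_candidate = next((c for c in candidates if c.get('source') == 'kg'), None)
--         if kg_candidate is not None and kg_candidate not in selected:
--             selected.append(kg_candidate)
--
--     if not has_text and len(selected) < top_k:
--         text_candidate = next((c for c in candidates if c.get('source') == 'text'), None)
--         if text_candidate is not None and text_candidate not in selected:
--             selected.append(text_candidate)
--
--     return selected[:top_k]
-- ===== SOURCE B (Python) =====
-- from typing import Dict, List
--
-- def _ensure_source_diversity(candidates: List[Dict], top_k: int) -> List[Dict]:
--     # The diversity-append branches of the original are unreachable:
--     # len(selected) < top_k only when selected == candidates, so any candidate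
--     # next() finds is already in selected. The selection is just the slice.
--     return candidates[:top_k]
-- ===== Notes on version B (the rewrite author's own statement) =====
-- stated objective: simpler
-- what changed: B collapses the whole body to candidates[:top_k]: the diversity-append branches of A are unreachable (len(selected) < top_k only when selected already equals candidates, so any found candidate is already selected), and the trailing re-slice only matters for negative top_k, where it silently truncates.
-- intended difference: For negative top_k, when candidates[:top_k] is nonempty and lacks a kg or text entry, A falls through to 'return selected[:top_k]' and slices a second time, returning candidates[:top_k][:top_k] (shorter than asked); B returns candidates[:top_k], the slice a count-style parameter is meant to select. — e.g. on _ensure_source_diversity([[("source", "a")], [("source", "b")]], -1): A returns [], B returns [[("source", "a")]]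
import Mathlib
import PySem

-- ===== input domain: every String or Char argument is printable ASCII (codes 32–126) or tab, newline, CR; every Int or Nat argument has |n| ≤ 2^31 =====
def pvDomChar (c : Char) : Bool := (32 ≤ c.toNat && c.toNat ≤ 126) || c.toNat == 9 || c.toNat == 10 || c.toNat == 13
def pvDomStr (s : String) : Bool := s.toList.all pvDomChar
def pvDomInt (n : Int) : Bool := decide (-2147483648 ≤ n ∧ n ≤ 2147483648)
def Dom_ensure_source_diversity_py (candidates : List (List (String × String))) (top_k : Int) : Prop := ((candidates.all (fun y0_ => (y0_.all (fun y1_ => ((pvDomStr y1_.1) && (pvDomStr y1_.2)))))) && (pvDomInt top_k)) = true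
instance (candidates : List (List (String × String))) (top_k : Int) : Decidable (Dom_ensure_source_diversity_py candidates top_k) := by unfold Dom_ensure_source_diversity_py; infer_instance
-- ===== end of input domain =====

-- B collapses A's body to the single slice candidates[:top_k] (A's diversity-append branches are
-- unreachable); for negative top_k A re-slices a second time — stated as the intended difference D_.


-- ===== PORT A =====
-- c.get('source') == v  (None == v is False)
def pvSrcIs (v : String) (c : List (String × String)) : Bool :=
  PySem.Dict.get? ⟨c⟩ "source" == some v

def ensure_source_diversity_py (candidates : List (List (String × String))) (top_k : Int) : List (List (String × String)) :=
  if candidates = [] then []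
  else
    let selected := PySem.List.slice candidates none (some top_k)
    let has_kg := selected.any (pvSrcIs "kg")
    let has_text := selected.any (pvSrcIs "text")
    if has_kg && has_text then selected
    else
      let selected1 :=
        if !has_kg && decide ((selected.length : Int) < top_k) then
          match candidates.find? (pvSrcIs "kg") with
          | some kg => if selected.contains kg then selected else selected ++ [kg]
          | none => selected
        else selected
      let selected2 :=
        if !has_text && decide ((selected1.length : Int) < top_k) then
          match candidates.find? (pvSrcIs "text") with
          | some tc => if selected1.contains tc then selected1 else selected1 ++ [tc]
          | none => selected1
        else selected1
      PySem.List.slice selected2 none (some top_k)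

-- ===== PORT B =====
def ensure_source_diversity_py_alt (candidates : List (List (String × String))) (top_k : Int) : List (List (String × String)) :=
  PySem.List.slice candidates none (some top_k)

-- ===== PRECONDITION & SPEC =====
-- For negative top_k, when candidates[:top_k] is nonempty and lacks a kg or a text entry, A slices a
-- second time and returns candidates[:top_k][:top_k]; B returns candidates[:top_k], the intended slice.
def D_ensure_source_diversity_py (candidates : List (List (String × String))) (top_k : Int) : Prop :=
  top_k < 0 ∧ -top_k < (candidates.length : Int) ∧
  ¬ ((PySem.List.slice candidates none (some top_k)).any (pvSrcIs "kg") = true ∧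
     (PySem.List.slice candidates none (some top_k)).any (pvSrcIs "text") = true)
instance (candidates : List (List (String × String))) (top_k : Int) : Decidable (D_ensure_source_diversity_py candidates top_k) := by unfold D_ensure_source_diversity_py; infer_instance

def Spec_ensure_source_diversity_py (candidates : List (List (String × String))) (top_k : Int) (out : List (List (String × String))) : Prop := ¬ D_ensure_source_diversity_py candidates top_k → out = ensure_source_diversity_py_alt candidates top_k
instance (candidates : List (List (String × String))) (top_k : Int) (out : List (List (String × String))) : Decidable (Spec_ensure_source_diversity_py candidates top_k out) := by unfold Spec_ensure_source_diversity_py; infer_instance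

def pvDiffWitness_ensure_source_diversity_py : (List (List (String × String))) × Int :=
  ([[("source", "a")], [("source", "b")]], -1)
def pvDiffWitnessOut_ensure_source_diversity_py : (List (List (String × String))) × (List (List (String × String))) :=
  ([], [[("source", "a")]])

-- ===== CLAIM (what is proved, stated in full; the proofs are below) =====
def Claim_unchanged_ensure_source_diversity_py : Prop := ∀ (candidates : List (List (String × String))) (top_k : Int), Dom_ensure_source_diversity_py candidates top_k → Spec_ensure_source_diversity_py candidates top_k (ensure_source_diversity_py candidates top_k)
def Claim_changed_ensure_source_diversity_py : Prop := Dom_ensure_source_diversity_py (pvDiffWitness_ensure_source_diversity_py.1) (pvDiffWitness_ensure_source_diversity_py.2) ∧ D_ensure_source_diversity_py (pvDiffWitness_ensure_source_diversity_py.1) (pvDiffWitness_ensure_source_diversity_py.2) ∧ ensure_source_diversity_py (pvDiffWitness_ensure_source_diversity_py.1) (pvDiffWitness_ensure_source_diversity_py.2) = pvDiffWitnessOut_ensure_source_diversity_py.1 ∧ ensure_source_diversity_py_alt (pvDiffWitness_ensure_source_diversity_py.1) (pvDiffWitness_ensure_source_diversity_py.2) = pvDiffWitnessOut_ensure_source_diversity_py.2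 ∧ pvDiffWitnessOut_ensure_source_diversity_py.1 ≠ pvDiffWitnessOut_ensure_source_diversity_py.2
def Claim_exact_ensure_source_diversity_py : Prop := ∀ (candidates : List (List (String × String))) (top_k : Int), Dom_ensure_source_diversity_py candidates top_k → D_ensure_source_diversity_py candidates top_k → ensure_source_diversity_py candidates top_k ≠ ensure_source_diversity_py_alt candidates top_k

-- ===== LEMMAS AND PROOFS =====

-- a slice of the empty list is empty
lemma pv_slice_nil {α : Type} (b : Int) : PySem.List.slice ([] : List α) none (some b) = [] := by
  apply List.eq_nil_iff_forall_not_mem.mpr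
  intro x hx
  have := PySem.List.mem_of_mem_slice _ _ _ hx
  simp at this

-- when the first slice is shorter than top_k, it already is the whole list
lemma pv_short_slice_eq {α : Type} (xs : List α) (t : Int)
    (h : ((PySem.List.slice xs none (some t)).length : Int) < t) :
    PySem.List.slice xs none (some t) = xs := by
  have ht : 0 ≤ t := le_of_lt (lt_of_le_of_lt (Int.natCast_nonneg _) h)
  rw [PySem.List.slice_to _ ht] at h ⊢
  have hlen := List.length_take (l := xs) (i := t.toNat)
  exact List.take_of_length_le (by omega)

-- negative top_k with |top_k| ≥ length: the slice is empty
lemma pv_neg_slice_nil {α : Type} (xs : List α) (t : Int) (ht : t < 0)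
    (h : (xs.length : Int) ≤ -t) : PySem.List.slice xs none (some t) = [] := by
  have hk : t = -(((-t).toNat : Nat) : Int) := by omega
  rw [hk, PySem.List.slice_to_neg_natCast _ _ (by omega)]
  have : xs.length - (-t).toNat = 0 := by omega
  simp [this]

theorem ensure_source_diversity_py_spec : Claim_unchanged_ensure_source_diversity_py := by
  intro candidates top_k _ hD
  unfold ensure_source_diversity_py ensure_source_diversity_py_alt
  by_cases hnil : candidates = []
  · simp [hnil, pv_slice_nil]
  · simp only [if_neg hnil]
    set sel := PySem.List.slice candidates none (some top_k) with hsel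
    by_cases hboth : sel.any (pvSrcIs "kg") = true ∧ sel.any (pvSrcIs "text") = true
    · simp [hboth.1, hboth.2]
    · have hB : ¬ (sel.any (pvSrcIs "kg") && sel.any (pvSrcIs "text")) = true := by
        simp only [Bool.and_eq_true]; exact hboth
      rw [if_neg hB]
      -- the two append branches never change `sel`
      have step : ∀ p : List (String × String) → Bool,
          (if !sel.any p && decide ((sel.length : Int) < top_k) then
            match candidates.find? p with
            | some c => if sel.contains c then sel else sel ++ [c]
            | none => sel
          else sel) = sel := by
        intro p
        by_cases hcond : (!sel.any p && decide ((sel.length : Int) < top_k)) = true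
        · have hlt : ((sel.length : Int) < top_k) := by
            simp only [Bool.and_eq_true, decide_eq_true_eq] at hcond; exact hcond.2
          have hfull : sel = candidates := pv_short_slice_eq candidates top_k hlt
          rw [if_pos hcond]
          cases hfind : candidates.find? p with
          | none => rfl
          | some c =>
            have hmem : c ∈ sel := hfull ▸ List.mem_of_find?_eq_some hfind
            simp [hmem]
        · rw [if_neg hcond]
      rw [step, step]
      -- remaining goal: slice sel none (some top_k) = sel
      by_cases hneg : top_k < 0
      · -- negative top_k: ¬D_ forces the slice to be empty
        have hempty : sel = [] := by
          rcases Decidable.em ((candidates.length : Int) ≤ -top_k) with hle | hgt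
          · exact pv_neg_slice_nil candidates top_k hneg hle
          · exact absurd ⟨hneg, by omega, hboth⟩ hD
        rw [hempty, pv_slice_nil]
      · -- nonnegative top_k: sel is already no longer than top_k
        have hpos : 0 ≤ top_k := by omega
        rw [PySem.List.slice_to _ hpos] at hsel ⊢
        rw [hsel, List.take_take]
        simp
  
theorem ensure_source_diversity_py_changed : Claim_changed_ensure_source_diversity_py := by
  unfold Claim_changed_ensure_source_diversity_py; decide

theorem ensure_source_diversity_py_tight : Claim_exact_ensure_source_diversity_py := by
  intro candidates top_k _ hD
  obtain ⟨hneg, hlen, hnot⟩ := hD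
  unfold ensure_source_diversity_py ensure_source_diversity_py_alt
  have hnil : candidates ≠ [] := by
    intro h; rw [h] at hlen; simp at hlen; omega
  simp only [if_neg hnil]
  set sel := PySem.List.slice candidates none (some top_k) with hsel
  have hB : ¬ (sel.any (pvSrcIs "kg") && sel.any (pvSrcIs "text")) = true := by
    simp only [Bool.and_eq_true]; exact hnot
  rw [if_neg hB]
  have hc1 : ∀ p : List (String × String) → Bool,
      (!sel.any p && decide ((sel.length : Int) < top_k)) = false := by
    intro p
    have : ¬ ((sel.length : Int) < top_k) := by
      have := Int.natCast_nonneg sel.length; omega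
    simp [this]
  simp only [hc1, Bool.false_eq_true, if_false]
  -- the re-slice is strictly shorter than sel
  have hk : top_k = -((((-top_k).toNat) : Nat) : Int) := by omega
  have hkpos : 0 < (-top_k).toNat := by omega
  have hsellen : sel.length = candidates.length - (-top_k).toNat := by
    rw [hsel, hk, PySem.List.slice_to_neg_natCast _ _ hkpos, List.length_take]
    omega
  intro heq
  have hlen2 := congrArg List.length heq
  rw [hk, PySem.List.slice_to_neg_natCast _ _ hkpos] at hlen2
  simp only [List.length_take] at hlen2
  omega

-- ===== VERDICT note: theorems above are stated by Claim_ name only =====
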